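-- pv_equiv track=rewrite | github.com/ZaneWharton/PromptBuddy | backend/main.py | normalize_risks
-- ===== SOURCE A (Python) =====
-- def normalize_risks(raw_risks: list[str]) -> list[str]:
--     normalized = []
--
--     for r in raw_risks:
--         r_lower = r.lower()
--         if "hallucinat" in r_lower:
--             normalized.append("hallucination")
--         elif "bias" in r_lower:
--             normalized.append("bias")
--         elif "overload" in r_lower:
--             normalized.append("overload")
--         elif "misinterpret" in r_lower:
--             normalized.append("misinterpretation")
--         elif "security" in r_lower:
--             normalized.append("security")
--         elif "privacy" in r_lower:
--             normalized.append("privacy")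
--         elif "ethical" in r_lower:
--             normalized.append("ethical")
--         else:
--             normalized.append("other")
--     return normalized
-- ===== SOURCE B (Python) =====
-- # Staged-pass algorithm: start all "other"; sweep (substring, label) pairs from
-- # LOWEST to HIGHEST priority, overwriting every matching slot, so the
-- # highest-priority match is written last and wins.
-- _RISKS_LOW_TO_HIGH = [
--     ("ethical", "ethical"),
--     ("privacy", "privacy"),
--     ("security", "security"),
--     ("misinterpret", "misinterpretation"),
--     ("overload", "overload"),
--     ("bias", "bias"),
--     ("hallucinat", "hallucination"),
-- ]
--
-- def normalize_risks(raw_risks: list[str]) -> list[str]: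
--     lows = [r.lower() for r in raw_risks]
--     out = ["other"] * len(lows)
--     for sub, label in _RISKS_LOW_TO_HIGH:
--         for i, s in enumerate(lows):
--             if sub in s:
--                 out[i] = label
--     return out
-- ===== Notes on version B (the rewrite author's own statement) =====
-- stated objective: alternative
-- what changed: Replaces the per-element first-match if/elif chain with staged overwrite passes: the output starts as all 'other' and each (substring,label) pair, swept from lowest to highest priority, overwrites the slots of matching strings, so the highest-priority label is written last and wins.
import Mathlib
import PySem

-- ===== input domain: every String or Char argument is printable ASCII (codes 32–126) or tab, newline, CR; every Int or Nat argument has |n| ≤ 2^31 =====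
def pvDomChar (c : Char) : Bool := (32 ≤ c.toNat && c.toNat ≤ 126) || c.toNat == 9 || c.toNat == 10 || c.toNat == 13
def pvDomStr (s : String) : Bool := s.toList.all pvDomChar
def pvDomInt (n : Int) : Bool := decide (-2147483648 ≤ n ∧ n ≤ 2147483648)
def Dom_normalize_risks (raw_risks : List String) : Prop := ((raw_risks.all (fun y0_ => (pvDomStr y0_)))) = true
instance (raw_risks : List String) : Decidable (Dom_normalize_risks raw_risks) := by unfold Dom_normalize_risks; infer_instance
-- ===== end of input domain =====

-- B replaces A's per-element if/elif first-match chain by staged overwrite sweeps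
-- (start all "other", overwrite matches from lowest to highest priority); objective: alternative.


-- ===== PORT A =====
def normalize_risks (raw_risks : List String) : List String :=
  raw_risks.foldl (fun normalized r =>
    let r_lower := PySem.Str.lower r
    if PySem.Str.isIn "hallucinat" r_lower then normalized ++ ["hallucination"]
    else if PySem.Str.isIn "bias" r_lower then normalized ++ ["bias"]
    else if PySem.Str.isIn "overload" r_lower then normalized ++ ["overload"]
    else if PySem.Str.isIn "misinterpret" r_lower then normalized ++ ["misinterpretation"]
    else if PySem.Str.isIn "security" r_lower then normalized ++ ["security"]
    else if PySem.Str.isIn "privacy" r_lower then normalized ++ ["privacy"]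
    else if PySem.Str.isIn "ethical" r_lower then normalized ++ ["ethical"]
    else normalized ++ ["other"]) []

-- ===== PORT B =====
-- sweep order: LOWEST to HIGHEST priority; each sweep overwrites the slots of matching strings
def risksLowToHigh : List (String × String) :=
  [("ethical", "ethical"), ("privacy", "privacy"), ("security", "security"),
   ("misinterpret", "misinterpretation"), ("overload", "overload"),
   ("bias", "bias"), ("hallucinat", "hallucination")]

def normalize_risks_alt (raw_risks : List String) : List String :=
  let lows := raw_risks.map PySem.Str.lower
  risksLowToHigh.foldl
    (fun out p =>
      -- inner loop: out[i] := p.2 wherever p.1 occurs in lows[i]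
      List.zipWith (fun s o => if PySem.Str.isIn p.1 s then p.2 else o) lows out)
    (List.replicate lows.length "other")

-- ===== PRECONDITION & SPEC =====
def Spec_normalize_risks (raw_risks : List String) (out : List String) : Prop := out = normalize_risks_alt raw_risks
instance (raw_risks : List String) (out : List String) : Decidable (Spec_normalize_risks raw_risks out) := by unfold Spec_normalize_risks; infer_instance

-- ===== CLAIM (what is proved, stated in full; the proofs are below) =====
def Claim_equal_normalize_risks : Prop := ∀ (raw_risks : List String), Dom_normalize_risks raw_risks → Spec_normalize_risks raw_risks (normalize_risks raw_risks)

-- ===== LEMMAS AND PROOFS =====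

-- the classification value both programs compute for one lowered string
def chainVal (s : String) : String :=
  if PySem.Str.isIn "hallucinat" s then "hallucination"
  else if PySem.Str.isIn "bias" s then "bias"
  else if PySem.Str.isIn "overload" s then "overload"
  else if PySem.Str.isIn "misinterpret" s then "misinterpretation"
  else if PySem.Str.isIn "security" s then "security"
  else if PySem.Str.isIn "privacy" s then "privacy"
  else if PySem.Str.isIn "ethical" s then "ethical"
  else "other"

-- chainVal with an arbitrary fallback value (what one slot holds after all sweeps)
def chainVal_with (s dflt : String) : String :=
  if PySem.Str.isIn "hallucinat" s then "hallucination"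
  else if PySem.Str.isIn "bias" s then "bias"
  else if PySem.Str.isIn "overload" s then "overload"
  else if PySem.Str.isIn "misinterpret" s then "misinterpretation"
  else if PySem.Str.isIn "security" s then "security"
  else if PySem.Str.isIn "privacy" s then "privacy"
  else if PySem.Str.isIn "ethical" s then "ethical"
  else dflt

def sweeps (lows out : List String) : List String :=
  risksLowToHigh.foldl
    (fun out p => List.zipWith (fun s o => if PySem.Str.isIn p.1 s then p.2 else o) lows out) out

theorem sweeps_cons (a b : String) (ls os : List String) :
    sweeps (a :: ls) (b :: os) = chainVal_with a b :: sweeps ls os := by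
  simp only [sweeps, risksLowToHigh, List.foldl_cons, List.foldl_nil,
    List.zipWith_cons_cons, chainVal_with]

theorem sweeps_replicate (ls : List String) :
    sweeps ls (List.replicate ls.length "other") = ls.map chainVal := by
  induction ls with
  | nil => rfl
  | cons a t ih =>
      rw [List.length_cons, List.replicate_succ, sweeps_cons, ih]
      rfl

theorem B_eq_map (l : List String) :
    normalize_risks_alt l = l.map (fun r => chainVal (PySem.Str.lower r)) := by
  show sweeps (l.map PySem.Str.lower) (List.replicate (l.map PySem.Str.lower).length "other")
      = l.map (fun r => chainVal (PySem.Str.lower r))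
  rw [sweeps_replicate, List.map_map]
  rfl

theorem A_eq_map (l : List String) (acc : List String) :
    (l.foldl (fun normalized r =>
      let r_lower := PySem.Str.lower r
      if PySem.Str.isIn "hallucinat" r_lower then normalized ++ ["hallucination"]
      else if PySem.Str.isIn "bias" r_lower then normalized ++ ["bias"]
      else if PySem.Str.isIn "overload" r_lower then normalized ++ ["overload"]
      else if PySem.Str.isIn "misinterpret" r_lower then normalized ++ ["misinterpretation"]
      else if PySem.Str.isIn "security" r_lower then normalized ++ ["security"]
      else if PySem.Str.isIn "privacy" r_lower then normalized ++ ["privacy"]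
      else if PySem.Str.isIn "ethical" r_lower then normalized ++ ["ethical"]
      else normalized ++ ["other"]) acc)
    = acc ++ l.map (fun r => chainVal (PySem.Str.lower r)) := by
  induction l generalizing acc with
  | nil => simp
  | cons h t ih =>
    simp only [List.foldl_cons, List.map_cons]
    rw [ih]
    unfold chainVal
    split_ifs <;> simp

-- ===== VERDICT (by name: the statement is the Claim_ definition above) =====
theorem normalize_risks_spec : Claim_equal_normalize_risks := by
  intro raw_risks _
  unfold Spec_normalize_risks normalize_risks
  rw [B_eq_map]
  simpa using A_eq_map raw_risks []
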